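-- pv_equiv track=rewrite | github.com/njriasan/tritonbench | tritonbench/utils/device_utils.py | compute_input_shards
-- ===== SOURCE A (Python) =====
-- from typing import List, Tuple
--
-- MIN_INPUTS_PER_DEVICE = 10
--
-- def compute_input_shards(
--     total_inputs: int,
--     num_devices: int,
--     min_inputs_per_device: int = MIN_INPUTS_PER_DEVICE,
-- ) -> List[Tuple[int, int]]:
--     """Compute per-device input shards for evenly distributing inputs.
--
--     Returns a list of (input_id_start, num_inputs) tuples, one per device.
--     Remainder inputs are distributed to the first devices.
--
--     If total_inputs / num_devices < min_inputs_per_device, the number of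
--     devices is reduced so each device gets at least min_inputs_per_device
--     inputs (with at least 1 device always used).
--
--     Examples:
--         compute_input_shards(100, 4) -> [(0,25), (25,25), (50,25), (75,25)]
--         compute_input_shards(10, 3)  -> [(0,10)]  # 3 devices capped to 1
--         compute_input_shards(25, 4)  -> [(0,13), (13,12)]  # 4 devices capped to 2
--     """
--     if total_inputs <= 0:
--         raise ValueError(f"total_inputs must be positive, got {total_inputs}")
--     if num_devices <= 0:
--         raise ValueError(f"num_devices must be positive, got {num_devices}")
--
--     if min_inputs_per_device > 0:
--         max_devices = max(1, total_inputs // min_inputs_per_device)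
--         num_devices = min(num_devices, max_devices)
--
--     base_size = total_inputs // num_devices
--     remainder = total_inputs % num_devices
--
--     shards = []
--     offset = 0
--     for i in range(num_devices):
--         shard_size = base_size + (1 if i < remainder else 0)
--         shards.append((offset, shard_size))
--         offset += shard_size
--
--     return shards
-- ===== SOURCE B (Python) =====
-- MIN_INPUTS_PER_DEVICE = 10
--
-- def compute_input_shards(total_inputs, num_devices, min_inputs_per_device=MIN_INPUTS_PER_DEVICE):
--     if total_inputs <= 0:
--         raise ValueError(f"total_inputs must be positive, got {total_inputs}")
--     if num_devices <= 0:
--         raise ValueError(f"num_devices must be positive, got {num_devices}")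
--     if min_inputs_per_device > 0:
--         num_devices = min(num_devices, max(1, total_inputs // min_inputs_per_device))
--
--     # Peel one shard at a time: the next device always takes the ceiling of an
--     # even split of what is still left.  No base/remainder precomputation.
--     shards = []
--     offset, remaining, devices_left = 0, total_inputs, num_devices
--     while devices_left > 0:
--         size = -(-remaining // devices_left)  # ceiling division
--         shards.append((offset, size))
--         offset += size
--         remaining -= size
--         devices_left -= 1
--     return shards
-- ===== Notes on version B (the rewrite author's own statement) =====
-- stated objective: alternative
-- what changed: B drops A's precomputed base_size/remainder split and the 'i < remainder' test entirely: it peels one shard at a time, giving each device the ceiling of remaining/devices_left on shrinking (remaining, devices_left) state.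
import Mathlib
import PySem

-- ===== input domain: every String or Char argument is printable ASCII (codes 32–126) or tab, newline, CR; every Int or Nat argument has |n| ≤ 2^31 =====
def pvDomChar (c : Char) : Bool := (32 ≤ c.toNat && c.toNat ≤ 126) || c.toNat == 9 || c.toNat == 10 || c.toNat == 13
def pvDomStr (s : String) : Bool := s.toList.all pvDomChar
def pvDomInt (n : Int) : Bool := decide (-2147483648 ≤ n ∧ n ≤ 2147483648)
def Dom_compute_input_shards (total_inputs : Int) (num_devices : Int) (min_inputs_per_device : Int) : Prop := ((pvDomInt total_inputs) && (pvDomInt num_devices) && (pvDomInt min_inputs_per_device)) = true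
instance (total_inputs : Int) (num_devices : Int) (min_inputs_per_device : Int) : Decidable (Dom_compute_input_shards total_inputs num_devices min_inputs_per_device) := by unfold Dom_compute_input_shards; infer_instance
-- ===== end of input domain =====

-- B replaces A's precomputed base_size/remainder arithmetic by peeling one shard at a
-- time, giving each device the ceiling of remaining/devices_left (objective: alternative).

-- ===== PORT A =====
def compute_input_shards (total_inputs : Int) (num_devices : Int) (min_inputs_per_device : Int) : List (Int × Int) :=
  let nd : Int :=
    if min_inputs_per_device > 0 then
      min num_devices (max 1 (PySem.Int.floordiv total_inputs min_inputs_per_device))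
    else num_devices
  let base_size := PySem.Int.floordiv total_inputs nd
  let remainder := PySem.Int.mod total_inputs nd
  let res := (PySem.List.pyRange 0 nd 1).foldl
    (fun (st : List (Int × Int) × Int) i =>
      let shard_size := base_size + (if i < remainder then 1 else 0)
      (st.1 ++ [(st.2, shard_size)], st.2 + shard_size)) ([], 0)
  res.1

-- ===== PORT B =====
-- B's while loop 'while devices_left > 0', fuel = initial devices_left (the loop runs exactly that often).
def shardPeel (fuel : Nat) (shards : List (Int × Int)) (offset remaining devices_left : Int) : List (Int × Int) :=
  match fuel with
  | 0 => shards
  | f + 1 =>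
    if devices_left > 0 then
      let size := -(PySem.Int.floordiv (-remaining) devices_left)   -- ceiling division
      shardPeel f (shards ++ [(offset, size)]) (offset + size) (remaining - size) (devices_left - 1)
    else shards

def compute_input_shards_alt (total_inputs : Int) (num_devices : Int) (min_inputs_per_device : Int) : List (Int × Int) :=
  let nd : Int :=
    if min_inputs_per_device > 0 then
      min num_devices (max 1 (PySem.Int.floordiv total_inputs min_inputs_per_device))
    else num_devices
  shardPeel nd.toNat [] 0 total_inputs nd

-- ===== PRECONDITION & SPEC =====
-- Pre_ excludes exactly the inputs where the Python A raises ValueError (non-positive total_inputs or num_devices).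
def Pre_compute_input_shards (total_inputs : Int) (num_devices : Int) (min_inputs_per_device : Int) : Prop :=
  0 < total_inputs ∧ 0 < num_devices
instance (total_inputs : Int) (num_devices : Int) (min_inputs_per_device : Int) : Decidable (Pre_compute_input_shards total_inputs num_devices min_inputs_per_device) := by unfold Pre_compute_input_shards; infer_instance
def pvWitness_compute_input_shards : Int × Int × Int := (25, 4, 10)

def Spec_compute_input_shards (total_inputs : Int) (num_devices : Int) (min_inputs_per_device : Int) (out : List (Int × Int)) : Prop := out = compute_input_shards_alt total_inputs num_devices min_inputs_per_device
instance (total_inputs : Int) (num_devices : Int) (min_inputs_per_device : Int) (out : List (Int × Int)) : Decidable (Spec_compute_input_shards total_inputs num_devices min_inputs_per_device out) := by unfold Spec_compute_input_shards; infer_instance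

-- ===== CLAIM (what is proved, stated in full; the proofs are below) =====
def Claim_equal_compute_input_shards : Prop := ∀ (total_inputs : Int) (num_devices : Int) (min_inputs_per_device : Int), Dom_compute_input_shards total_inputs num_devices min_inputs_per_device → Pre_compute_input_shards total_inputs num_devices min_inputs_per_device → Spec_compute_input_shards total_inputs num_devices min_inputs_per_device (compute_input_shards total_inputs num_devices min_inputs_per_device)

-- ===== LEMMAS AND PROOFS =====

-- A's loop over range(n), with its threaded (shards, offset) state, in closed form.
theorem shards_loop (base_size remainder : Int) (hrem : 0 ≤ remainder) (n : Nat) :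
    (PySem.List.pyRange 0 (n : Int) 1).foldl
      (fun (st : List (Int × Int) × Int) i =>
        let shard_size := base_size + (if i < remainder then 1 else 0)
        (st.1 ++ [(st.2, shard_size)], st.2 + shard_size)) ([], 0)
    = ((PySem.List.pyRange 0 (n : Int) 1).map
        (fun i => (i * base_size + min i remainder, base_size + (if i < remainder then 1 else 0))),
       (n : Int) * base_size + min (n : Int) remainder) := by
  induction n with
  | zero => simp [PySem.List.pyRange_one_eq_nil]; omega
  | succ n ih =>
    rw [show ((n + 1 : Nat) : Int) = (n : Int) + 1 by push_cast; ring,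
        PySem.List.pyRange_one_succ_right (by positivity)]
    rw [List.foldl_append, List.map_append, ih]
    simp only [List.foldl_cons, List.foldl_nil, List.map_cons, List.map_nil]
    congr 1
    rw [add_one_mul]
    split_ifs with hlt <;> omega

-- B's peeling loop in the same closed form: with remaining = n*b + r and 0 ≤ r < n,
-- the per-step ceiling division reproduces base size b plus one for the first r devices.
theorem shardPeel_eq (n : Nat) : ∀ (acc : List (Int × Int)) (o b r : Int),
    0 ≤ r → (0 < n → r < n) →
    shardPeel n acc o ((n : Int) * b + r) (n : Int)
    = acc ++ (List.range n).map
        (fun (i : Nat) => ((o + (i : Int) * b + min (i : Int) r,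
                            b + (if (i : Int) < r then 1 else 0)) : Int × Int)) := by
  induction n with
  | zero => intro acc o b r _ _; simp [shardPeel]
  | succ n ih =>
    intro acc o b r hr hrlt
    have hrlt' : r < (n : Int) + 1 := by exact_mod_cast hrlt (Nat.succ_pos n)
    rw [shardPeel]
    have hnd : (((n + 1 : Nat) : Int)) = (n : Int) + 1 := by push_cast; ring
    simp only [hnd]
    rw [if_pos (by positivity)]
    set c : Int := if (0 : Int) < r then 1 else 0 with hc
    have hsize : -(PySem.Int.floordiv (-(((n : Int) + 1) * b + r)) ((n : Int) + 1)) = b + c := by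
      rw [PySem.Int.neg_floordiv_neg_eq_iff_of_pos (by omega)]
      rw [hc]; split_ifs with h0 <;> constructor <;> nlinarith
    simp only [hsize]
    have hrem : ((n : Int) + 1) * b + r - (b + c) = (n : Int) * b + (r - c) := by ring
    have hnd' : (n : Int) + 1 - 1 = ((n : Nat) : Int) := by ring
    rw [hrem, hnd', ih _ (o + (b + c)) b (r - c)
      (by rw [hc]; split_ifs <;> omega)
      (fun hn => by
        have hn' : (0 : Int) < (n : Int) := by exact_mod_cast hn
        rw [hc]; split_ifs <;> omega)]
    rw [List.range_succ_eq_map, List.map_cons, List.map_map, List.append_assoc,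
        List.singleton_append]
    congr 1
    congr 1
    · have h0r : min (0 : Int) r = 0 := by omega
      simp only [Nat.cast_zero, zero_mul, add_zero, h0r, hc]
    · apply List.map_congr_left
      intro i _
      have hcsucc : ((Nat.succ i : Nat) : Int) = (i : Int) + 1 := by push_cast; ring
      simp only [Function.comp_apply, hcsucc, Prod.mk.injEq]
      rw [hc]
      have hb1 : ((i : Int) + 1) * b = (i : Int) * b + b := by ring
      rw [hb1]
      split_ifs <;> constructor <;> omega

-- ===== VERDICT (by name: the statement is the Claim_ definition above) =====
theorem compute_input_shards_spec : Claim_equal_compute_input_shards := by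
  intro total_inputs num_devices min_inputs_per_device _ hpre
  obtain ⟨ht, hn⟩ := hpre
  unfold Spec_compute_input_shards
  simp only [compute_input_shards, compute_input_shards_alt]
  set nd : Int :=
    if min_inputs_per_device > 0 then
      min num_devices (max 1 (PySem.Int.floordiv total_inputs min_inputs_per_device))
    else num_devices with hnd
  have hndpos : 0 < nd := by
    rw [hnd]; split_ifs
    · exact lt_min hn (lt_of_lt_of_le one_pos (le_max_left _ _))
    · exact hn
  obtain ⟨m, hm⟩ : ∃ m : Nat, nd = (m : Int) := ⟨nd.toNat, (Int.toNat_of_nonneg hndpos.le).symm⟩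
  set b : Int := PySem.Int.floordiv total_inputs nd with hb
  set r : Int := PySem.Int.mod total_inputs nd with hrdef
  have hr0 : 0 ≤ r := PySem.Int.mod_nonneg _ hndpos
  have hrlt : r < nd := PySem.Int.mod_lt _ hndpos
  have htot : b * nd + r = total_inputs := PySem.Int.floordiv_mul_add_mod _ _
  rw [hm]
  rw [shards_loop b r hr0 m]
  have htoNat : ((m : Int)).toNat = m := Int.toNat_natCast m
  have hT : total_inputs = ((m : Nat) : Int) * b + r := by rw [hm] at htot; linarith
  rw [htoNat, hT, shardPeel_eq m [] 0 b r hr0 (fun _ => by rw [hm] at hrlt; exact_mod_cast hrlt)]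
  rw [PySem.List.pyRange_one]
  simp only [sub_zero, Int.toNat_natCast, List.nil_append, List.map_map]
  apply List.map_congr_left
  intro i _
  simp only [Function.comp_apply, zero_add]
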